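-- pv_equiv track=rewrite | github.com/DINESHKUMAR6867/job-ready-profile | scoring/utils.py | calculate_github_score
-- ===== SOURCE A (Python) =====
-- def calculate_github_score(github_data):
--     """Calculates GitHub score based on the presence of relevant repositories and activity."""
--     if github_data:
--         # Example: Scoring based on number of repos and activity
--         repos = github_data.get("repos", [])
--         score = 0
--         for repo in repos:
--             commits = repo.get("commits", 0)
--             if commits > 5:
--                 score += 5
--             else:
--                 score += 2
--         return score
--     return 0
-- ===== SOURCE B (Python) =====
-- def _repos_total(repos):
--     """Divide-and-conquer sum of per-repo contributions (5 if commits > 5 else 2)."""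
--     if not repos:
--         return 0
--     if len(repos) == 1:
--         return 5 if repos[0].get("commits", 0) > 5 else 2
--     mid = len(repos) // 2
--     return _repos_total(repos[:mid]) + _repos_total(repos[mid:])
--
-- def calculate_github_score(github_data):
--     """Calculates GitHub score based on the presence of relevant repositories and activity."""
--     if not github_data:
--         return 0
--     return _repos_total(github_data.get("repos", []))
-- ===== Notes on version B (the rewrite author's own statement) =====
-- stated objective: alternative
-- what changed: Replaces A's accumulating for-loop with a divide-and-conquer recursion that splits the repo list at the midpoint and adds the two halves' 5-or-2 contribution sums.
import Mathlib
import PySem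

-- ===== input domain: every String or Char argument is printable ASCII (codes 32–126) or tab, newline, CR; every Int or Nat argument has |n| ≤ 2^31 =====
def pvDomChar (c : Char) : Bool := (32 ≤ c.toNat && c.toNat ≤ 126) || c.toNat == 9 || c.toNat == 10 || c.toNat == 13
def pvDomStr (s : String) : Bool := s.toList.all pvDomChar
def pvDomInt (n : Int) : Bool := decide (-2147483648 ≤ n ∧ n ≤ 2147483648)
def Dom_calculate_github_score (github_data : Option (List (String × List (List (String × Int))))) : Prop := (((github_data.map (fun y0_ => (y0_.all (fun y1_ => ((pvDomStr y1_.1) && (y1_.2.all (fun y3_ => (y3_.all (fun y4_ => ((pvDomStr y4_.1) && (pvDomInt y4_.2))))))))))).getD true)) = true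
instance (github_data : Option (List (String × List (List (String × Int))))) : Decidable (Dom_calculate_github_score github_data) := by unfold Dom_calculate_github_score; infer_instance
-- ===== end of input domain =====

-- B differs from A only in control structure (divide-and-conquer vs a running loop); same return value everywhere.

-- ===== PORT A =====
-- A: accumulates 5 or 2 per repo in a running score.
def calculate_github_score (github_data : Option (List (String × List (List (String × Int))))) : Int :=
  match github_data with
  | none => 0
  | some d =>
    if d ≠ [] then
      let repos := (PySem.Dict.mk d).getD "repos" []
      let score : Int := repos.foldl (fun score repo =>
        let commits := (PySem.Dict.mk repo).getD "commits" 0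
        if commits > 5 then score + 5 else score + 2) 0
      score
    else 0

-- ===== PORT B =====
-- B: divide-and-conquer — split the repo list at the midpoint and add the two halves' sums.
def pvReposTotal (repos : List (List (String × Int))) : Int :=
  match h : repos with
  | [] => 0
  | [r] => if (PySem.Dict.mk r).getD "commits" 0 > 5 then (5 : Int) else 2
  | r1 :: r2 :: rest =>
    let mid := PySem.Int.floordiv ((repos.length : Int)) 2
    pvReposTotal (PySem.List.slice repos none (some mid)) +
    pvReposTotal (PySem.List.slice repos (some mid) none)
termination_by repos.length
decreasing_by
  · subst h
    have hm : PySem.Int.floordiv (((r1 :: r2 :: rest).length : Int)) 2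
        = (((r1 :: r2 :: rest).length / 2 : Nat) : Int) := by
      exact_mod_cast PySem.Int.floordiv_natCast (r1 :: r2 :: rest).length 2
    rw [hm, PySem.List.slice_to_natCast]
    simp; omega
  · subst h
    have hm : PySem.Int.floordiv (((r1 :: r2 :: rest).length : Int)) 2
        = (((r1 :: r2 :: rest).length / 2 : Nat) : Int) := by
      exact_mod_cast PySem.Int.floordiv_natCast (r1 :: r2 :: rest).length 2
    rw [hm, PySem.List.slice_from_natCast]
    simp; omega

def calculate_github_score_alt (github_data : Option (List (String × List (List (String × Int))))) : Int :=
  match github_data with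
  | none => 0
  | some d =>
    if d = [] then 0
    else pvReposTotal ((PySem.Dict.mk d).getD "repos" [])

-- ===== PRECONDITION & SPEC =====
def Spec_calculate_github_score (github_data : Option (List (String × List (List (String × Int))))) (out : Int) : Prop := out = calculate_github_score_alt github_data
instance (github_data : Option (List (String × List (List (String × Int))))) (out : Int) : Decidable (Spec_calculate_github_score github_data out) := by unfold Spec_calculate_github_score; infer_instance

-- ===== CLAIM (what is proved, stated in full; the proofs are below) =====
def Claim_equal_calculate_github_score : Prop := ∀ (github_data : Option (List (String × List (List (String × Int))))), Dom_calculate_github_score github_data → Spec_calculate_github_score github_data (calculate_github_score github_data)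

-- ===== LEMMAS AND PROOFS =====

def pvContrib (repo : List (String × Int)) : Int :=
  if (PySem.Dict.mk repo).getD "commits" 0 > 5 then (5 : Int) else 2

theorem pvReposTotal_eq_sum (l : List (List (String × Int))) :
    pvReposTotal l = (l.map pvContrib).sum := by
  match l with
  | [] => simp [pvReposTotal]
  | [r] => simp [pvReposTotal, pvContrib]
  | r1 :: r2 :: rest =>
    rw [pvReposTotal]
    have hm : PySem.Int.floordiv (((r1 :: r2 :: rest).length : Int)) 2
        = (((r1 :: r2 :: rest).length / 2 : Nat) : Int) := by
      exact_mod_cast PySem.Int.floordiv_natCast (r1 :: r2 :: rest).length 2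
    rw [hm, PySem.List.slice_to_natCast, PySem.List.slice_from_natCast]
    rw [pvReposTotal_eq_sum, pvReposTotal_eq_sum]
    rw [← List.sum_append, ← List.map_append, List.take_append_drop]
termination_by l.length
decreasing_by
  · simp; omega
  · simp; omega

theorem score_fold_eq_sum (repos : List (List (String × Int))) (s : Int) :
    repos.foldl (fun score repo =>
        let commits := (PySem.Dict.mk repo).getD "commits" 0
        if commits > 5 then score + 5 else score + 2) s
      = s + (repos.map pvContrib).sum := by
  induction repos generalizing s with
  | nil => simp
  | cons r rest ih =>
    simp only [List.foldl_cons, List.map_cons, List.sum_cons, ih]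
    unfold pvContrib
    by_cases h : (PySem.Dict.mk r).getD "commits" 0 > 5
    · simp only [if_pos h]; ring
    · simp only [if_neg h]; ring

-- ===== VERDICT (by name: the statement is the Claim_ definition above) =====
theorem calculate_github_score_spec : Claim_equal_calculate_github_score := by
  intro g _
  unfold Spec_calculate_github_score calculate_github_score calculate_github_score_alt
  match g with
  | none => rfl
  | some d =>
    by_cases hd : d = [] <;> simp [hd, score_fold_eq_sum, pvReposTotal_eq_sum]
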